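-- pv_equiv track=rewrite | github.com/AvinashDyasa/Role-Param_Fuzzer | Role_Param-Fuzzer.py | _merge_cookie_values_only
-- ===== SOURCE A (Python) =====
-- def _parse_cookie_header_string(cookie_header):
--     """
--     Parses a Cookie header string into ordered list of (name, value) pairs.
--     Keeps original spacing around semicolons when we re-join.
--     """
--     parts = [p.strip() for p in cookie_header.split(';')]
--     pairs = []
--     for p in parts:
--         if not p:
--             continue
--         if '=' in p:
--             name, val = p.split('=', 1)
--             pairs.append((name.strip(), val))
--         else:
--             # Bare token (rare), keep as name with empty value
--             pairs.append((p.strip(), ""))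
--     return pairs
--
-- def _merge_cookie_values_only(existing_cookie_str, new_cookie_map):
--     """
--     Replace ONLY values of cookies that already exist in the header.
--     Do NOT add new cookies.
--     """
--     pairs = _parse_cookie_header_string(existing_cookie_str)
--     out_pairs = []
--     for name, val in pairs:
--         if name in new_cookie_map:
--             # Replace only the value part; keep as-is formatting for '=' and ordering
--             out_pairs.append((name, new_cookie_map[name]))
--         else:
--             out_pairs.append((name, val))
--     # Re-join with '; ' (common formatting)
--     return '; '.join(['{}={}'.format(n, v) if v != "" else n for n, v in out_pairs])
-- ===== SOURCE B (Python) =====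
-- def _merge_cookie_values_only(existing_cookie_str, new_cookie_map):
--     """Streaming scanner: peel one cookie at a time with str.partition in a while
--     loop and grow the result string directly -- no split lists, no join."""
--     out = ""
--     first = True
--     s = existing_cookie_str
--     more = True
--     while more:
--         head, sep, s = s.partition(';')
--         more = sep != ''
--         part = head.strip()
--         if not part:
--             continue
--         name, eq, value = part.partition('=')
--         if eq:
--             name = name.strip()
--         if name in new_cookie_map:
--             value = new_cookie_map[name]
--         piece = name + '=' + value if value != '' else name
--         if first:
--             out = piece
--             first = False
--         else:
--             out = out + '; ' + piece
--     return out
-- ===== Notes on version B (the rewrite author's own statement) =====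
-- stated objective: alternative
-- what changed: B replaces A's split-into-lists / merge pair-list / format-and-join pipeline by a streaming scanner: a while loop peels one cookie at a time with str.partition(';'), resolves the name via str.partition('='), and grows the result string directly with a first-piece flag, so no part list, no pair lists and no join are ever built.
import Mathlib
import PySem

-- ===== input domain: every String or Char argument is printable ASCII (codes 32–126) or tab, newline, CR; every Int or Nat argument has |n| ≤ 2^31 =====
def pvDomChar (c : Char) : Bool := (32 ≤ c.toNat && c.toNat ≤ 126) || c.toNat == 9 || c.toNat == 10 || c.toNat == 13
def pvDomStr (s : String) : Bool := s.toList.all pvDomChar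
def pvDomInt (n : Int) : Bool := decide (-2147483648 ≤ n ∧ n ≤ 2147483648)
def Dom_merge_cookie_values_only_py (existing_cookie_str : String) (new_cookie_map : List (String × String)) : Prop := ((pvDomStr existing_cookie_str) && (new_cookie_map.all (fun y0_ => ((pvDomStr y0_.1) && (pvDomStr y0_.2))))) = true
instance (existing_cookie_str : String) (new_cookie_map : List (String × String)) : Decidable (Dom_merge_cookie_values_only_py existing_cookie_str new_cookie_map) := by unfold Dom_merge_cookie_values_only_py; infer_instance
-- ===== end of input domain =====

-- B replaces A's split/merge/format-join pipeline by a streaming partition-based scanner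
-- building the output string directly; same O(n) cost, different decomposition.

-- ===== PORT A =====
-- helper _parse_cookie_header_string; ';' and '=' are nonempty separators, so split?/splitMax?
-- always return some.  The '_' match arm is unreachable: p.split('=', 1) with '=' in p yields
-- exactly two pieces (Python's tuple unpacking would raise otherwise).
def pvParseCookieHeader (cookie_header : String) : List (String × String) :=
  let parts := ((PySem.Str.split? cookie_header ";").getD []).map (fun p => PySem.Str.strip p)
  parts.foldl (fun pairs p =>
    if p = "" then pairs
    else if PySem.Str.isIn "=" p then
      match PySem.Str.splitMax? p "=" 1 with
      | some (name :: val :: _) => pairs ++ [(PySem.Str.strip name, val)]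
      | _ => pairs
    else pairs ++ [(PySem.Str.strip p, "")]) []

def merge_cookie_values_only_py (existing_cookie_str : String) (new_cookie_map : List (String × String)) : String :=
  let d := PySem.Dict.ofList new_cookie_map
  let pairs := pvParseCookieHeader existing_cookie_str
  let out_pairs := pairs.foldl (fun acc nv =>
    if d.contains nv.1 then acc ++ [(nv.1, (d.get? nv.1).getD "")] else acc ++ [nv])
    ([] : List (String × String))
  PySem.Str.join "; " (out_pairs.map (fun nv => if nv.2 ≠ "" then nv.1 ++ "=" ++ nv.2 else nv.1))

-- ===== PORT B =====
-- str.partition(c) for a one-char separator, ported by hand as a scan for the FIRST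
-- occurrence of c (exact: CPython scans left to right and splits at the first hit);
-- 'none' is Python's (s, '', '') no-separator result, 'some (h, t)' is (h, c, t).
def pvPartitionC (c : Char) : List Char → Option (List Char × List Char)
  | [] => none
  | a :: rest =>
    if a = c then some ([], rest)
    else (pvPartitionC c rest).map (fun p => (a :: p.1, p.2))

theorem pvPartitionC_some_length (c : Char) :
    ∀ (l h t : List Char), pvPartitionC c l = some (h, t) → t.length < l.length := by
  intro l
  induction l with
  | nil => intro h t hpn; simp [pvPartitionC] at hpn
  | cons a rest ih =>
    intro h t hp
    by_cases hac : a = c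
    · simp [pvPartitionC, hac] at hp
      simp [← hp.2, List.length_cons]
    · simp only [pvPartitionC, hac, if_false, Option.map_eq_some_iff] at hp
      obtain ⟨⟨h', t'⟩, hp', heq⟩ := hp
      have := ih h' t' hp'
      cases heq
      simp [List.length_cons]
      omega

-- the body of one iteration of Source B's while loop, on the already-peeled raw part
-- (state = (out, first); strings handled as their char lists, re-packed at dict lookups)
def pvBStep (d : PySem.Dict String String) (st : String × Bool) (head : List Char) : String × Bool :=
  let part := PySem.Chars.strip head
  if part = [] then st
  else
    let nv : List Char × List Char :=
      match pvPartitionC '=' part with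
      | some (n, v) => (PySem.Chars.strip n, v)
      | none => (part, [])
    let value : List Char :=
      if d.contains (String.ofList nv.1) then ((d.get? (String.ofList nv.1)).getD "").toList
      else nv.2
    let piece : List Char := if value ≠ [] then nv.1 ++ '=' :: value else nv.1
    if st.2 then (String.ofList piece, false)
    else (st.1 ++ "; " ++ String.ofList piece, false)

-- Source B's while loop: peel the next part with partition(';'), run the body, continue
-- while a separator was found
def pvBLoop (d : PySem.Dict String String) (st : String × Bool) (s : List Char) : String × Bool :=
  match hp : pvPartitionC ';' s with
  | none => pvBStep d st s
  | some (head, rest) => pvBLoop d (pvBStep d st head) rest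
termination_by s.length
decreasing_by exact pvPartitionC_some_length ';' s head rest hp

def merge_cookie_values_only_py_alt (existing_cookie_str : String) (new_cookie_map : List (String × String)) : String :=
  let d := PySem.Dict.ofList new_cookie_map
  (pvBLoop d ("", true) existing_cookie_str.toList).1

-- ===== PRECONDITION & SPEC =====
def Spec_merge_cookie_values_only_py (existing_cookie_str : String) (new_cookie_map : List (String × String)) (out : String) : Prop := out = merge_cookie_values_only_py_alt existing_cookie_str new_cookie_map
instance (existing_cookie_str : String) (new_cookie_map : List (String × String)) (out : String) : Decidable (Spec_merge_cookie_values_only_py existing_cookie_str new_cookie_map out) := by unfold Spec_merge_cookie_values_only_py; infer_instance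

-- ===== CLAIM (what is proved, stated in full; the proofs are below) =====
def Claim_equal_merge_cookie_values_only_py : Prop := ∀ (existing_cookie_str : String) (new_cookie_map : List (String × String)), Dom_merge_cookie_values_only_py existing_cookie_str new_cookie_map → Spec_merge_cookie_values_only_py existing_cookie_str new_cookie_map (merge_cookie_values_only_py existing_cookie_str new_cookie_map)

-- ===== LEMMAS AND PROOFS =====

-- strip is idempotent (needed because A re-strips the already-stripped bare token / name)
theorem pvLstripRstripOfLstripped (l : List Char) (h : List.dropWhile PySem.Chars.isspace l = l) :
    List.dropWhile PySem.Chars.isspace (PySem.Chars.rstrip l) = PySem.Chars.rstrip l := by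
  unfold PySem.Chars.rstrip
  have hpre : (List.dropWhile PySem.Chars.isspace l.reverse).reverse <+: l := by
    have hs : List.dropWhile PySem.Chars.isspace l.reverse <:+ l.reverse := List.dropWhile_suffix _
    have h2 := (List.reverse_prefix (l₁ := List.dropWhile PySem.Chars.isspace l.reverse)
      (l₂ := l.reverse)).mpr hs
    simpa using h2
  rcases hd : (List.dropWhile PySem.Chars.isspace l.reverse).reverse with _ | ⟨a, t⟩
  · simp
  · rw [hd] at hpre
    obtain ⟨r, hr⟩ := hpre
    rw [List.dropWhile_cons]
    have hpa : PySem.Chars.isspace a = false := by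
      by_contra hc
      simp only [Bool.not_eq_false] at hc
      rw [← hr, List.cons_append, List.dropWhile_cons, hc] at h
      simp only [if_true] at h
      have h1 := congrArg List.length h
      have h2 := List.length_dropWhile_le (p := PySem.Chars.isspace) (l := t ++ r)
      simp only [List.length_cons] at h1
      omega
    simp [hpa]

theorem pvCharsStripIdem (l : List Char) :
    PySem.Chars.strip (PySem.Chars.strip l) = PySem.Chars.strip l := by
  unfold PySem.Chars.strip PySem.Chars.lstrip
  rw [pvLstripRstripOfLstripped _ (List.dropWhile_idempotent _ _)]
  unfold PySem.Chars.rstrip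
  rw [List.reverse_reverse, List.dropWhile_idempotent]

-- what A's parse loop contributes for one (already-stripped) part
def pvParseF (p : String) : List (String × String) :=
  if p = "" then []
  else if PySem.Str.isIn "=" p then
    match PySem.Str.splitMax? p "=" 1 with
    | some (name :: val :: _) => [(PySem.Str.strip name, val)]
    | _ => []
  else [(PySem.Str.strip p, "")]

-- A's merge step on one pair
def pvGm (d : PySem.Dict String String) (nv : String × String) : String × String :=
  if d.contains nv.1 then (nv.1, (d.get? nv.1).getD "") else nv

-- A's format step
def pvFmt (nv : String × String) : String :=
  if nv.2 ≠ "" then nv.1 ++ "=" ++ nv.2 else nv.1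

-- what one raw part of A contributes to the final joined list
def pvBF (d : PySem.Dict String String) (q : String) : List String :=
  (pvParseF (PySem.Str.strip q)).map (fun nv => pvFmt (pvGm d nv))

-- an append-accumulator foldl is acc ++ flatMap
theorem pvFoldlFlatMap {α β : Type} (f : List β → α → List β) (g : α → List β)
    (hf : ∀ acc x, f acc x = acc ++ g x) :
    ∀ (l : List α) (acc : List β), l.foldl f acc = acc ++ l.flatMap g := by
  intro l
  induction l with
  | nil => simp
  | cons x xs ih =>
    intro acc
    simp only [List.foldl_cons, List.flatMap_cons, hf]
    rw [ih, List.append_assoc]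

theorem pvParseEq (s : String) :
    pvParseCookieHeader s =
      ((PySem.Str.split? s ";").getD []).flatMap (fun q => pvParseF (PySem.Str.strip q)) := by
  unfold pvParseCookieHeader
  rw [pvFoldlFlatMap _ pvParseF ?hstep]
  · simp [List.flatMap_map]
  case hstep =>
    intro acc p
    unfold pvParseF
    by_cases h0 : p = ""
    · simp [h0]
    · simp only [h0, if_false]
      by_cases h1 : PySem.Str.isIn "=" p = true <;> simp only [h1, if_true]
      · rcases hsp : PySem.Str.splitMax? p "=" 1 with _ | ⟨_ | ⟨n, _ | ⟨v, rest⟩⟩⟩ <;> simp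
      · simp

theorem pvMergeEq (d : PySem.Dict String String) (pairs : List (String × String)) :
    pairs.foldl (fun acc nv =>
        if d.contains nv.1 then acc ++ [(nv.1, (d.get? nv.1).getD "")] else acc ++ [nv])
      ([] : List (String × String)) = pairs.map (pvGm d) := by
  rw [pvFoldlFlatMap _ (fun nv => [pvGm d nv]) ?hstep]
  · rw [List.nil_append, ← List.map_eq_flatMap]
  case hstep =>
    intro acc nv
    unfold pvGm
    by_cases h : d.contains nv.1 <;> simp [h]

-- A rephrased: the joined list is a flatMap of per-part contributions
theorem pvAEq (s : String) (m : List (String × String)) :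
    merge_cookie_values_only_py s m =
      PySem.Str.join "; "
        (((PySem.Str.split? s ";").getD []).flatMap (pvBF (PySem.Dict.ofList m))) := by
  unfold merge_cookie_values_only_py
  dsimp only
  rw [pvMergeEq, pvParseEq]
  congr 1
  simp only [List.map_flatMap, List.map_map]
  rfl

-- ---------- characterizing splitOn via pvPartitionC ----------

-- the split of l on the single-char separator c, stated as partition recursion
def pvSpl (c : Char) (l : List Char) : List (List Char) :=
  match hp : pvPartitionC c l with
  | none => [l]
  | some (h, t) => h :: pvSpl c t
termination_by l.length
decreasing_by exact pvPartitionC_some_length c l h t hp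

theorem pvSpl_eq (c : Char) (l : List Char) :
    pvSpl c l = match pvPartitionC c l with
      | none => [l]
      | some p => p.1 :: pvSpl c p.2 := by
  rw [pvSpl]
  split <;> rename_i heq <;> simp [heq]

theorem pvSpl_ne_nil (c : Char) (l : List Char) : pvSpl c l ≠ [] := by
  rw [pvSpl_eq]
  rcases pvPartitionC c l with _ | ⟨h, t⟩ <;> simp

theorem pvSpl_cons_ne (c a : Char) (rest : List Char) (hac : a ≠ c) :
    pvSpl c (a :: rest) = (pvSpl c rest).modifyHead (a :: ·) := by
  rw [pvSpl_eq]
  simp only [pvPartitionC, hac, if_false]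
  rcases hp : pvPartitionC c rest with _ | ⟨h, t⟩
  · rw [pvSpl_eq, hp]
    simp
  · conv_rhs => rw [pvSpl_eq, hp]
    simp

theorem pvSpl_cons_eq (c : Char) (rest : List Char) :
    pvSpl c (c :: rest) = [] :: pvSpl c rest := by
  rw [pvSpl_eq]
  simp [pvPartitionC]

theorem pvGoSpl (c : Char) :
    ∀ (fuel : Nat) (l : List Char), l.length < fuel → ∀ (cur : List Char) (acc : List (List Char)),
      PySem.Chars.splitOn.go [c] fuel l cur acc =
        acc.reverse ++ (pvSpl c l).modifyHead (cur.reverse ++ ·) := by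
  intro fuel
  induction fuel with
  | zero => intro l hl; omega
  | succ f ih =>
    intro l hl cur acc
    match l with
    | [] =>
      rw [PySem.Chars.splitOn.go]
      · rw [pvSpl_eq]
        simp [pvPartitionC]
      · omega
    | a :: rest =>
      by_cases hac : a = c
      · subst hac
        rw [PySem.Chars.splitOn.go]
        have hpre : [a].isPrefixOf (a :: rest) = true := by simp [List.isPrefixOf]
        rw [if_pos hpre]
        have hdrop : List.drop [a].length (a :: rest) = rest := by simp
        rw [hdrop]
        simp only [List.length_cons] at hl
        rw [ih rest (by omega)]
        rw [pvSpl_cons_eq]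
        cases hsp : pvSpl a rest <;> simp
      · rw [PySem.Chars.splitOn.go]
        have hpre : [c].isPrefixOf (a :: rest) = false := by
          simp [List.isPrefixOf]
          intro h; exact absurd h.symm hac
        rw [if_neg (by simp [hpre])]
        simp only [List.length_cons] at hl
        rw [ih rest (by omega)]
        rw [pvSpl_cons_ne c a rest hac]
        congr 1
        rcases hsp : pvSpl c rest with _ | ⟨h, t⟩
        · exact absurd hsp (pvSpl_ne_nil c rest)
        · simp

theorem pvSplitOnEq (c : Char) (l : List Char) :
    PySem.Chars.splitOn l [c] = pvSpl c l := by
  unfold PySem.Chars.splitOn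
  rw [pvGoSpl c (l.length + 1) l (by omega)]
  rcases hsp : pvSpl c l with _ | ⟨h, t⟩
  · exact absurd hsp (pvSpl_ne_nil c l)
  · simp

-- ---------- characterizing split(sep, 1) and 'in' via pvPartitionC ----------

theorem pvPartitionC_none_not_mem (c : Char) :
    ∀ (l : List Char), pvPartitionC c l = none → c ∉ l := by
  intro l
  induction l with
  | nil => simp
  | cons a rest ih =>
    intro hp
    by_cases hac : a = c
    · simp [pvPartitionC, hac] at hp
    · simp only [pvPartitionC, hac, if_false, Option.map_eq_none_iff] at hp
      have := ih hp
      simp [List.mem_cons, this]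
      intro h; exact absurd h.symm hac

theorem pvPartitionC_some_shape (c : Char) :
    ∀ (l h t : List Char), pvPartitionC c l = some (h, t) → l = h ++ c :: t ∧ c ∉ h := by
  intro l
  induction l with
  | nil => intro h t hpn; simp [pvPartitionC] at hpn
  | cons a rest ih =>
    intro h t hp
    by_cases hac : a = c
    · subst hac
      simp [pvPartitionC] at hp
      refine ⟨?_, ?_⟩ <;> simp_all
    · simp only [pvPartitionC, hac, if_false, Option.map_eq_some_iff] at hp
      obtain ⟨⟨h', t'⟩, hp', heq⟩ := hp
      obtain ⟨hsh, hnm⟩ := ih h' t' hp'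
      cases heq
      constructor
      · simp [hsh]
      · simp [List.mem_cons, hnm]
        intro hh; exact absurd hh.symm hac

theorem pvGoM0 (c : Char) (fuel : Nat) (l cur : List Char) (acc : List (List Char)) :
    PySem.Chars.splitOnMax.go [c] fuel 0 l cur acc = acc.reverse ++ [cur.reverse ++ l] := by
  match fuel, l with
  | 0, l => rw [PySem.Chars.splitOnMax.go]; simp
  | f + 1, [] =>
    rw [PySem.Chars.splitOnMax.go]
    · simp
    · omega
  | f + 1, a :: rest => rw [PySem.Chars.splitOnMax.go]; simp

theorem pvGoM1 (c : Char) :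
    ∀ (n : List Char), c ∉ n → ∀ (v cur : List Char) (acc : List (List Char)) (fuel : Nat),
      n.length + v.length + 1 < fuel →
      PySem.Chars.splitOnMax.go [c] fuel 1 (n ++ c :: v) cur acc =
        acc.reverse ++ [cur.reverse ++ n, v] := by
  intro n
  induction n with
  | nil =>
    intro _ v cur acc fuel hf
    match fuel with
    | 0 => omega
    | f + 1 =>
      simp only [List.nil_append]
      rw [PySem.Chars.splitOnMax.go]
      have hpre : [c].isPrefixOf (c :: v) = true := by simp [List.isPrefixOf]
      rw [if_neg (by omega), if_pos hpre]
      simp only [List.length_cons]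
      rw [pvGoM0]
      simp
  | cons a n' ih =>
    intro hnm v cur acc fuel hf
    match fuel with
    | 0 => omega
    | f + 1 =>
      have hac : a ≠ c := by intro h; exact hnm (by simp [h])
      simp only [List.cons_append]
      rw [PySem.Chars.splitOnMax.go]
      have hpre : [c].isPrefixOf (a :: (n' ++ c :: v)) = false := by
        simp [List.isPrefixOf]
        intro h; exact absurd h.symm hac
      rw [if_neg (by omega), if_neg (by simp [hpre])]
      have hnm' : c ∉ n' := fun h => hnm (by simp [h])
      simp only [List.length_cons] at hf
      rw [ih hnm' v (a :: cur) acc f (by omega)]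
      simp

theorem pvIsInOfMem (c : Char) (l : List Char) (h : c ∈ l) :
    PySem.Chars.isIn [c] l = true := by
  rw [PySem.Chars.isIn_iff_infix]
  obtain ⟨s1, s2, hs⟩ := List.append_of_mem h
  exact ⟨s1, s2, by simp [hs]⟩

theorem pvIsInOfNotMem (c : Char) (l : List Char) (h : c ∉ l) :
    PySem.Chars.isIn [c] l = false := by
  rw [PySem.Chars.isIn_eq_false_iff]
  intro hinf
  exact h (hinf.subset (by simp))

theorem pvSplitMax1OfPartition (c : Char) (l n v : List Char)
    (hp : pvPartitionC c l = some (n, v)) :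
    PySem.Chars.splitOnMax l [c] 1 = [n, v] := by
  obtain ⟨hsh, hnm⟩ := pvPartitionC_some_shape c l n v hp
  unfold PySem.Chars.splitOnMax
  rw [if_neg (by omega)]
  subst hsh
  have h1 : (1 : Int).toNat = 1 := rfl
  rw [h1, pvGoM1 c n hnm v [] [] ((n ++ c :: v).length + 1) (by simp)]
  simp

-- ---------- B's loop as a fold over the split parts ----------

theorem pvBLoop_eq (d : PySem.Dict String String) (st : String × Bool) (l : List Char) :
    pvBLoop d st l = match pvPartitionC ';' l with
      | none => pvBStep d st l
      | some p => pvBLoop d (pvBStep d st p.1) p.2 := by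
  rw [pvBLoop]
  split <;> rename_i heq <;> simp [heq]

theorem pvBLoopFold (d : PySem.Dict String String) :
    ∀ (l : List Char) (st : String × Bool),
      pvBLoop d st l = (pvSpl ';' l).foldl (pvBStep d) st := by
  intro l
  induction hl : l.length using Nat.strong_induction_on generalizing l with
  | _ fuel ih =>
    intro st
    rw [pvBLoop_eq, pvSpl_eq]
    rcases hp : pvPartitionC ';' l with _ | ⟨h, t⟩
    · simp
    · simp only [List.foldl_cons]
      subst hl
      exact ih t.length (pvPartitionC_some_length ';' l h t hp) t rfl (pvBStep d st h)

-- string glue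
theorem pvOfListInj (l1 l2 : List Char) (h : String.ofList l1 = String.ofList l2) : l1 = l2 := by
  have := congrArg String.toList h
  simpa using this

theorem pvStrOfListEmpty (l : List Char) : (String.ofList l = "") ↔ l = [] := by
  constructor
  · intro h; exact pvOfListInj l [] (by simpa using h)
  · intro h; simp [h]

theorem pvStripOfList (h : List Char) :
    PySem.Str.strip (String.ofList h) = String.ofList (PySem.Chars.strip h) := by
  unfold PySem.Str.strip
  rw [String.toList_ofList]

-- join over a snoc
theorem pvToListInj (s t : String) (h : s.toList = t.toList) : s = t := by
  have := congrArg String.ofList h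
  simpa using this

theorem pvJoinSnocChars (sep x : List Char) :
    ∀ (acc : List (List Char)), acc ≠ [] →
      PySem.Chars.join sep (acc ++ [x]) = PySem.Chars.join sep acc ++ sep ++ x := by
  intro acc
  induction acc with
  | nil => intro h; exact absurd rfl h
  | cons a as ih =>
    intro _
    match as with
    | [] =>
      rw [show ([a] : List (List Char)) ++ [x] = [a, x] from rfl]
      rw [PySem.Chars.join_cons_cons, PySem.Chars.join_singleton, PySem.Chars.join_singleton]
    | b :: bs =>
      rw [show (a :: b :: bs) ++ [x] = a :: ((b :: bs) ++ [x]) from rfl]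
      have h1 : (b :: bs) ++ [x] = b :: (bs ++ [x]) := rfl
      rw [h1]
      rcases hbx : bs ++ [x] with _ | ⟨y, ys⟩
      · exact absurd hbx (by simp)
      · rw [PySem.Chars.join_cons_cons, ← hbx, ← h1, ih (by simp), PySem.Chars.join_cons_cons]
        simp [List.append_assoc]

theorem pvJoinSnoc (x : String) :
    ∀ (acc : List String),
      PySem.Str.join "; " (acc ++ [x]) =
        if acc.isEmpty then x else PySem.Str.join "; " acc ++ "; " ++ x := by
  intro acc
  match acc with
  | [] =>
    simp only [List.isEmpty_nil, List.nil_append, if_true]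
    apply pvToListInj
    rw [PySem.Str.toList_join]
    simp [PySem.Chars.join_singleton]
  | a :: as =>
    rw [if_neg (by simp)]
    apply pvToListInj
    rw [PySem.Str.toList_join]
    simp only [String.toList_append, PySem.Str.toList_join]
    rw [List.map_append]
    simp only [List.map_cons, List.map_nil]
    rw [pvJoinSnocChars _ x.toList _ (by simp)]

-- A side's stripped part re-stripped is itself
theorem pvStrStripIdem2 (h : List Char) :
    PySem.Str.strip (String.ofList (PySem.Chars.strip h)) = String.ofList (PySem.Chars.strip h) := by
  rw [pvStripOfList, pvCharsStripIdem]

-- the single formatted piece B emits for a nonempty stripped part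
def pvPiece (d : PySem.Dict String String) (part : List Char) : List Char :=
  let nv : List Char × List Char :=
    match pvPartitionC '=' part with
    | some (n, v) => (PySem.Chars.strip n, v)
    | none => (part, [])
  let value : List Char :=
    if d.contains (String.ofList nv.1) then ((d.get? (String.ofList nv.1)).getD "").toList
    else nv.2
  if value ≠ [] then nv.1 ++ '=' :: value else nv.1

theorem pvFmtOfList (x y : List Char) :
    pvFmt (String.ofList x, String.ofList y) =
      String.ofList (if y ≠ [] then x ++ '=' :: y else x) := by
  unfold pvFmt
  by_cases hy : y = []
  · simp [hy]
  · rw [if_pos (by simpa [pvStrOfListEmpty] using hy), if_pos hy]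
    apply String.ext
    simp

-- per-part agreement: A's contribution for a raw part is B's piece (or nothing)
theorem pvBFPiece (d : PySem.Dict String String) (h : List Char) :
    pvBF d (String.ofList h) =
      if PySem.Chars.strip h = [] then []
      else [String.ofList (pvPiece d (PySem.Chars.strip h))] := by
  unfold pvBF pvParseF pvPiece
  rw [pvStripOfList]
  by_cases h0 : PySem.Chars.strip h = []
  · simp [h0]
  · rw [if_neg h0, if_neg (by rw [pvStrOfListEmpty]; exact h0)]
    rcases hp : pvPartitionC '=' (PySem.Chars.strip h) with _ | ⟨n, v⟩
    · -- bare token: no '='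
      have hnm := pvPartitionC_none_not_mem '=' _ hp
      have hin : PySem.Str.isIn "=" (String.ofList (PySem.Chars.strip h)) = false := by
        rw [PySem.Str.isIn_eq]
        simpa using pvIsInOfNotMem '=' _ hnm
      rw [hin]
      simp only [Bool.false_eq_true, if_false, List.map_cons, List.map_nil]
      rw [pvStrStripIdem2]
      unfold pvGm
      dsimp only
      by_cases hc : d.contains (String.ofList (PySem.Chars.strip h)) = true
      · rw [if_pos hc, if_pos hc]
        have := pvFmtOfList (PySem.Chars.strip h)
          ((d.get? (String.ofList (PySem.Chars.strip h))).getD "").toList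
        simp only [String.ofList_toList] at this
        rw [this]
      · rw [if_neg hc, if_neg hc]
        have := pvFmtOfList (PySem.Chars.strip h) []
        simpa using this
    · -- part contains '='
      have hmem : '=' ∈ PySem.Chars.strip h := by
        obtain ⟨hsh, _⟩ := pvPartitionC_some_shape '=' _ n v hp
        rw [hsh]; simp
      have hin : PySem.Str.isIn "=" (String.ofList (PySem.Chars.strip h)) = true := by
        rw [PySem.Str.isIn_eq]
        simpa using pvIsInOfMem '=' _ hmem
      rw [hin]
      simp only [if_true]
      have hsm : PySem.Str.splitMax? (String.ofList (PySem.Chars.strip h)) "=" 1 =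
          some [String.ofList n, String.ofList v] := by
        unfold PySem.Str.splitMax?
        rw [show ("=" : String).toList = ['='] from rfl]
        unfold PySem.Chars.splitMax?
        rw [if_neg (by simp)]
        simp [String.toList_ofList, pvSplitMax1OfPartition '=' _ n v hp]
      rw [hsm]
      simp only [List.map_cons, List.map_nil]
      unfold pvGm
      dsimp only
      rw [pvStripOfList]
      by_cases hc : d.contains (String.ofList (PySem.Chars.strip n)) = true
      · rw [if_pos hc, if_pos hc]
        have := pvFmtOfList (PySem.Chars.strip n)
          ((d.get? (String.ofList (PySem.Chars.strip n))).getD "").toList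
        simp only [String.ofList_toList] at this
        rw [this]
      · rw [if_neg hc, if_neg hc]
        rw [pvFmtOfList]

-- the loop-body step is a join-snoc of that part's pvBF contribution
theorem pvStepEq (d : PySem.Dict String String) (acc : List String) (h : List Char) :
    pvBStep d (PySem.Str.join "; " acc, acc.isEmpty) h =
      (PySem.Str.join "; " (acc ++ pvBF d (String.ofList h)),
       (acc ++ pvBF d (String.ofList h)).isEmpty) := by
  rw [pvBFPiece]
  by_cases h0 : PySem.Chars.strip h = []
  · simp [pvBStep, h0]
  · rw [if_neg h0]
    unfold pvBStep
    rw [if_neg h0]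
    show (if acc.isEmpty then (String.ofList (pvPiece d (PySem.Chars.strip h)), false)
          else (PySem.Str.join "; " acc ++ "; " ++ String.ofList (pvPiece d (PySem.Chars.strip h)), false)) = _
    rw [pvJoinSnoc]
    by_cases hacc : acc.isEmpty <;> simp [hacc]

-- fold invariant
theorem pvFoldInv (d : PySem.Dict String String) :
    ∀ (ps : List (List Char)) (acc : List String),
      ps.foldl (pvBStep d) (PySem.Str.join "; " acc, acc.isEmpty) =
        (PySem.Str.join "; " (acc ++ ps.flatMap (fun h => pvBF d (String.ofList h))),
         (acc ++ ps.flatMap (fun h => pvBF d (String.ofList h))).isEmpty) := by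
  intro ps
  induction ps with
  | nil => simp
  | cons h t ih =>
    intro acc
    simp only [List.foldl_cons, List.flatMap_cons]
    rw [pvStepEq, ih (acc ++ pvBF d (String.ofList h))]
    simp [List.append_assoc]

-- ===== VERDICT (by name: the statement is the Claim_ definition above) =====
theorem merge_cookie_values_only_py_spec : Claim_equal_merge_cookie_values_only_py := by
  intro s m _
  unfold Spec_merge_cookie_values_only_py
  rw [pvAEq]
  unfold merge_cookie_values_only_py_alt
  dsimp only
  rw [pvBLoopFold]
  have hsp : (PySem.Str.split? s ";").getD [] = (pvSpl ';' s.toList).map String.ofList := by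
    unfold PySem.Str.split?
    rw [show (";" : String).toList = [';'] from rfl]
    unfold PySem.Chars.split?
    rw [if_neg (by simp)]
    rw [pvSplitOnEq]
    simp
  rw [hsp]
  have h0 : (("" : String), true) = (PySem.Str.join "; " ([] : List String), ([] : List String).isEmpty) := by
    simp [PySem.Str.join, PySem.Chars.join, List.intercalate]
  rw [h0, pvFoldInv]
  simp [List.flatMap_map]
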